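-- pv_equiv track=rewrite | github.com/miliar/Code_Jam_Webscraper | solutions_python/Problem_201/2692.py | find_d_for_last_occupant_iterative
-- ===== SOURCE A (Python) =====
-- import math
--
-- def left_distance(stalls,stall_index):
--     distance = 0;
--     for i in reversed(range(0,stall_index)):
--         if stalls[i] == 1:
--             return distance
--         distance = distance +1
--     return distance
--
-- def right_distance(stalls,stall_index):
--     distance = 0;
--     for i in range(stall_index+1,len(stalls)):
--         if stalls[i] == 1:
--             return distance
--         distance = distance +1
--     return distance
--
-- def find_d_for_last_occupant_iterative(stalls, num_occupants):
--     max_d = 0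
--     min_d = math.floor(len(stalls) / 2)
--     indices = [k for k in range(1,len(stalls)-1)]
--     for i in range (0, num_occupants):
--         # compute d
--         closest = 0
--         closest_max = 0
--         index = min(indices)
--         for j in indices:
--             if stalls[j] != 1:
--                 right = right_distance(stalls,j)
--                 left = left_distance(stalls,j)
--                 # closest = min(left,right)
--                 if min(left,right) > closest:
--                     closest = min(left,right)
--                     closest_max = max(left, right)
--                     index = j
--                 if min(left,right) == closest:
--                     if max(left,right) > closest_max:
--                         closest_max =max(left,right)
--                         closest = min(left,right)
--                         index = j
--
--         stalls[index] = 1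
--         indices.remove(index)
--         max_d = closest_max
--         min_d = closest
--     return max_d,min_d
-- ===== SOURCE B (Python) =====
-- def find_d_for_last_occupant_iterative(stalls, num_occupants):
--     # Same selection rule as the original, but the per-candidate left/right
--     # distance scans are replaced by two whole-list sweeps per occupant.
--     # NOTE: like the original, this mutates `stalls` in place.
--     n = len(stalls)
--     free = list(range(1, n - 1))
--     max_d = 0
--     min_d = n // 2
--     for _ in range(num_occupants):
--         # left[j] = run of non-occupied stalls immediately left of j (one forward sweep)
--         left = []
--         c = 0
--         for x in stalls:
--             left.append(c)
--             c = 0 if x == 1 else c + 1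
--         # right[j] = same to the right (one sweep over the reversed list)
--         right = []
--         c = 0
--         for x in reversed(stalls):
--             right.append(c)
--             c = 0 if x == 1 else c + 1
--         right.reverse()
--         closest, closest_max, index = 0, 0, min(free)
--         for j in free:
--             if stalls[j] != 1:
--                 lo, hi = min(left[j], right[j]), max(left[j], right[j])
--                 if (closest, closest_max) < (lo, hi):
--                     closest, closest_max, index = lo, hi, j
--         stalls[index] = 1
--         free.remove(index)
--         max_d, min_d = closest_max, closest
--     return max_d, min_d
-- ===== Notes on version B (the rewrite author's own statement) =====
-- stated objective: faster
-- what changed: The per-candidate left/right distance scans (an O(n) scan per free stall per occupant) are replaced by two whole-list sweeps per occupant that precompute every stall's left and right free-run lengths, and the two-branch best-update is collapsed into one lexicographic tuple comparison; the selection loop then only does O(1) array lookups.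
import Mathlib
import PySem

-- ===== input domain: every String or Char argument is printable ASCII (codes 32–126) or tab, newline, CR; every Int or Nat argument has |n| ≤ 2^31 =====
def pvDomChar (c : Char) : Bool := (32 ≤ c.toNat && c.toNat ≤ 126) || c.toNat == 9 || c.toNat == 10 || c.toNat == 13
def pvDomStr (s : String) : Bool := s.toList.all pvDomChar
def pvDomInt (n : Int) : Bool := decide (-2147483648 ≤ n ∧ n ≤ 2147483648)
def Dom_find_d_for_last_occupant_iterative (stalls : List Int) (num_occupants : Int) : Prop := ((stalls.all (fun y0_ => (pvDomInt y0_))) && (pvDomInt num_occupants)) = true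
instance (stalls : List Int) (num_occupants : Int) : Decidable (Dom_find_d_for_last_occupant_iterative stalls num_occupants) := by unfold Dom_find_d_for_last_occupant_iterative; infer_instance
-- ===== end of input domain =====

-- B replaces the per-candidate left/right distance scans by two whole-list sweeps
-- per occupant (asymptotically faster selection); return-value equivalence is proved.
-- Both Pythons mutate `stalls` in place identically; the theorems are about the return value.
-- ===== PORT A =====
-- left_distance: downward scan from stall_index-1 with early return at an occupied stall
-- (indices are in range at every call site, so List.getD is exact there)
def pvLdLoop (stalls : List Int) : Nat -> Int -> Int
  | 0, d => d
  | i + 1, d => if stalls.getD i 0 = 1 then d else pvLdLoop stalls i (d + 1)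

def left_distance (stalls : List Int) (stall_index : Int) : Int :=
  pvLdLoop stalls stall_index.toNat 0

-- right_distance: upward scan from stall_index+1 with early return
def pvRdLoop (stalls : List Int) (i : Nat) (d : Int) : Int :=
  if _h : i < stalls.length then
    (if stalls.getD i 0 = 1 then d else pvRdLoop stalls (i + 1) (d + 1))
  else d
termination_by stalls.length - i

def right_distance (stalls : List Int) (stall_index : Int) : Int :=
  pvRdLoop stalls (stall_index + 1).toNat 0

-- body of A's inner `for j in indices:` loop; state = (closest, closest_max, index)
def pvStepA (stalls : List Int) (s : Int × Int × Int) (j : Int) : Int × Int × Int :=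
  if PySem.List.pyGetD stalls j 0 ≠ 1 then
    let right := right_distance stalls j
    let left := left_distance stalls j
    let s1 := if min left right > s.1 then (min left right, max left right, j) else s
    if min left right = s1.1 ∧ max left right > s1.2.1 then (min left right, max left right, j) else s1
  else s

-- one iteration of A's outer loop; state = (stalls, indices, max_d, min_d)
def pvIterA (st : List Int × List Int × Int × Int) : List Int × List Int × Int × Int :=
  let index0 := (PySem.List.min? st.2.1 (fun x => x)).getD 0  -- min(indices); none = ValueError, excluded by Pre_
  let r := st.2.1.foldl (pvStepA st.1) (0, 0, index0)
  (PySem.List.pySetD st.1 r.2.2 1,                 -- stalls[index] = 1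
   (PySem.List.remove? st.2.1 r.2.2).getD st.2.1,  -- indices.remove(index); index is always present
   r.2.1, r.1)

def find_d_for_last_occupant_iterative (stalls : List Int) (num_occupants : Int) : List Int :=
  let indices := PySem.List.pyRange 1 ((stalls.length : Int) - 1) 1
  let r := (PySem.List.pyRange 0 num_occupants 1).foldl (fun st _ => pvIterA st)
             (stalls, indices, 0, PySem.Int.floordiv (stalls.length : Int) 2)
  [r.2.2.1, r.2.2.2]

-- ===== PORT B =====
-- one sweep of Source B: emits the running count of non-occupied stalls seen since the last `1`
def pvSweep (c : Int) : List Int -> List Int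
  | [] => []
  | x :: xs => c :: pvSweep (if x = 1 then 0 else c + 1) xs

-- body of B's selection loop: O(1) lookups in the two sweep arrays, one lexicographic test
def pvStepB (stalls leftA rightA : List Int) (s : Int × Int × Int) (j : Int) : Int × Int × Int :=
  if PySem.List.pyGetD stalls j 0 ≠ 1 then
    let lo := min (PySem.List.pyGetD leftA j 0) (PySem.List.pyGetD rightA j 0)
    let hi := max (PySem.List.pyGetD leftA j 0) (PySem.List.pyGetD rightA j 0)
    if s.1 < lo ∨ (s.1 = lo ∧ s.2.1 < hi) then (lo, hi, j) else s
  else s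

-- one iteration of B's outer loop; state = (stalls, free, max_d, min_d)
def pvIterB (st : List Int × List Int × Int × Int) : List Int × List Int × Int × Int :=
  let leftA := pvSweep 0 st.1
  let rightA := (pvSweep 0 st.1.reverse).reverse
  let index0 := (PySem.List.min? st.2.1 (fun x => x)).getD 0  -- min(free); none = ValueError, excluded by Pre_
  let r := st.2.1.foldl (pvStepB st.1 leftA rightA) (0, 0, index0)
  (PySem.List.pySetD st.1 r.2.2 1,
   (PySem.List.remove? st.2.1 r.2.2).getD st.2.1,
   r.2.1, r.1)

def find_d_for_last_occupant_iterative_alt (stalls : List Int) (num_occupants : Int) : List Int :=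
  let free := PySem.List.pyRange 1 ((stalls.length : Int) - 1) 1
  let r := (PySem.List.pyRange 0 num_occupants 1).foldl (fun st _ => pvIterB st)
             (stalls, free, 0, PySem.Int.floordiv (stalls.length : Int) 2)
  [r.2.2.1, r.2.2.2]

-- ===== PRECONDITION & SPEC =====
-- exactly the inputs on which Python A returns: with num_occupants >= 1 occupants it calls
-- min(indices) on a list of len(stalls)-2 interior indices shrinking by one per occupant,
-- so it raises ValueError iff num_occupants exceeds len(stalls)-2
def Pre_find_d_for_last_occupant_iterative (stalls : List Int) (num_occupants : Int) : Prop :=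
  num_occupants ≤ 0 ∨ num_occupants ≤ (stalls.length : Int) - 2
instance (stalls : List Int) (num_occupants : Int) : Decidable (Pre_find_d_for_last_occupant_iterative stalls num_occupants) := by unfold Pre_find_d_for_last_occupant_iterative; infer_instance

def pvWitness_find_d_for_last_occupant_iterative : List Int × Int := ([1, 0, 0, 0, 1], 2)

def Spec_find_d_for_last_occupant_iterative (stalls : List Int) (num_occupants : Int) (out : List Int) : Prop := out = find_d_for_last_occupant_iterative_alt stalls num_occupants
instance (stalls : List Int) (num_occupants : Int) (out : List Int) : Decidable (Spec_find_d_for_last_occupant_iterative stalls num_occupants out) := by unfold Spec_find_d_for_last_occupant_iterative; infer_instance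

-- ===== CLAIM (what is proved, stated in full; the proofs are below) =====
def Claim_equal_find_d_for_last_occupant_iterative : Prop := ∀ (stalls : List Int) (num_occupants : Int), Dom_find_d_for_last_occupant_iterative stalls num_occupants → Pre_find_d_for_last_occupant_iterative stalls num_occupants → Spec_find_d_for_last_occupant_iterative stalls num_occupants (find_d_for_last_occupant_iterative stalls num_occupants)

-- ===== LEMMAS AND PROOFS =====

-- the sweep counter as a fold over a prefix
def pvCt (l : List Int) : Int := l.foldl (fun a x => if x = 1 then 0 else a + 1) 0

-- leading free-run count (what right_distance computes)
def pvClf : List Int -> Int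
  | [] => 0
  | x :: xs => if x = 1 then 0 else pvClf xs + 1

theorem pvCt_append_singleton (l : List Int) (x : Int) :
    pvCt (l ++ [x]) = if x = 1 then 0 else pvCt l + 1 := by
  simp [pvCt, List.foldl_append]

theorem pvCt_reverse (l : List Int) : pvCt l.reverse = pvClf l := by
  induction l with
  | nil => simp [pvCt, pvClf]
  | cons x xs ih =>
    rw [List.reverse_cons, pvCt_append_singleton, pvClf, ih]

theorem pvLdLoop_add (stalls : List Int) (k : Nat) (d : Int) :
    pvLdLoop stalls k d = pvLdLoop stalls k 0 + d := by
  induction k generalizing d with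
  | zero => simp only [pvLdLoop]; omega
  | succ i ih =>
    simp only [pvLdLoop]
    by_cases h : stalls.getD i 0 = 1
    · simp only [if_pos h]; omega
    · simp only [if_neg h]
      rw [ih (d + 1), ih (0 + 1)]
      omega

theorem pvLdLoop_eq_pvCt (stalls : List Int) (k : Nat) (hk : k ≤ stalls.length) :
    pvLdLoop stalls k 0 = pvCt (stalls.take k) := by
  induction k with
  | zero => simp [pvLdLoop, pvCt]
  | succ i ih =>
    have hi : i < stalls.length := by omega
    have ht : stalls.take (i + 1) = stalls.take i ++ [stalls[i]] := by
      rw [List.take_add_one]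
      simp [List.getElem?_eq_getElem hi]
    rw [ht, pvCt_append_singleton]
    have hg : stalls.getD i 0 = stalls[i] := List.getD_eq_getElem stalls 0 hi
    simp only [pvLdLoop, hg]
    by_cases h : stalls[i] = 1
    · simp [h]
    · simp only [if_neg h]
      rw [pvLdLoop_add stalls i (0 + 1), ih (by omega)]
      omega

theorem pvRdLoop_unfold (stalls : List Int) (i : Nat) (d : Int) :
    pvRdLoop stalls i d =
      if i < stalls.length then
        (if stalls.getD i 0 = 1 then d else pvRdLoop stalls (i + 1) (d + 1))
      else d := by
  rw [pvRdLoop]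
  simp only [dite_eq_ite]

theorem pvRdLoop_add (stalls : List Int) (i : Nat) (d : Int) :
    pvRdLoop stalls i d = pvRdLoop stalls i 0 + d := by
  induction hn : stalls.length - i generalizing i d with
  | zero =>
    have h1 : ¬ i < stalls.length := by omega
    rw [pvRdLoop_unfold stalls i d, pvRdLoop_unfold stalls i 0]
    simp only [if_neg h1]; omega
  | succ n ih =>
    have hi : i < stalls.length := by omega
    rw [pvRdLoop_unfold stalls i d, pvRdLoop_unfold stalls i 0]
    by_cases h : stalls.getD i 0 = 1
    · simp only [if_pos hi, if_pos h]; omega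
    · simp only [if_pos hi, if_neg h]
      rw [ih (i + 1) (d + 1) (by omega), ih (i + 1) (0 + 1) (by omega)]
      omega

theorem pvRdLoop_eq_pvClf (stalls : List Int) (i : Nat) :
    pvRdLoop stalls i 0 = pvClf (stalls.drop i) := by
  induction hn : stalls.length - i generalizing i with
  | zero =>
    have h1 : ¬ i < stalls.length := by omega
    have hd : stalls.drop i = [] := List.drop_eq_nil_of_le (by omega)
    rw [pvRdLoop_unfold, hd]
    simp only [if_neg h1]
    rfl
  | succ n ih =>
    have hi : i < stalls.length := by omega
    have hd : stalls.drop i = stalls[i] :: stalls.drop (i + 1) :=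
      (List.getElem_cons_drop hi).symm
    rw [pvRdLoop_unfold, hd]
    have hg : stalls.getD i 0 = stalls[i] := List.getD_eq_getElem stalls 0 hi
    simp only [if_pos hi, hg, pvClf]
    by_cases h : stalls[i] = 1
    · simp [h]
    · simp only [if_neg h]
      rw [pvRdLoop_add stalls (i + 1) (0 + 1), ih (i + 1) (by omega)]
      omega

theorem pvSweep_length (c : Int) (xs : List Int) : (pvSweep c xs).length = xs.length := by
  induction xs generalizing c with
  | nil => rfl
  | cons x xs ih => simp [pvSweep, ih]

theorem pvSweep_getD (xs : List Int) (c : Int) (k : Nat) (hk : k < xs.length) :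
    (pvSweep c xs).getD k 0 = (xs.take k).foldl (fun a x => if x = 1 then 0 else a + 1) c := by
  induction xs generalizing c k with
  | nil => simp at hk
  | cons x xs ih =>
    cases k with
    | zero => simp [pvSweep]
    | succ k =>
      simp only [pvSweep, List.getD_cons_succ, List.take_succ_cons, List.foldl_cons]
      exact ih _ _ (by simpa using hk)

theorem pvLeftArr_getD (stalls : List Int) (j : Int) (h0 : 0 ≤ j) (h1 : j < (stalls.length : Int)) :
    PySem.List.pyGetD (pvSweep 0 stalls) j 0 = left_distance stalls j := by
  rw [PySem.List.pyGetD_of_nonneg _ _ h0]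
  rw [pvSweep_getD stalls 0 j.toNat (by omega)]
  unfold left_distance
  rw [pvLdLoop_eq_pvCt stalls j.toNat (by omega)]
  rfl

theorem pvRightArr_getD (stalls : List Int) (j : Int) (h0 : 0 ≤ j) (h1 : j < (stalls.length : Int)) :
    PySem.List.pyGetD ((pvSweep 0 stalls.reverse).reverse) j 0 = right_distance stalls j := by
  have hn : j.toNat < stalls.length := by omega
  have hlen : (pvSweep 0 stalls.reverse).length = stalls.length := by
    rw [pvSweep_length, List.length_reverse]
  have hr : j.toNat < (pvSweep 0 stalls.reverse).reverse.length := by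
    rw [List.length_reverse, hlen]; omega
  rw [PySem.List.pyGetD_of_nonneg _ _ h0]
  rw [List.getD_eq_getElem _ _ hr, List.getElem_reverse]
  have hlt : (pvSweep 0 stalls.reverse).length - 1 - j.toNat < (pvSweep 0 stalls.reverse).length := by
    omega
  rw [← List.getD_eq_getElem _ 0 hlt]
  rw [hlen]
  rw [pvSweep_getD stalls.reverse 0 (stalls.length - 1 - j.toNat) (by simp; omega)]
  have htk : stalls.reverse.take (stalls.length - 1 - j.toNat)
      = (stalls.drop (j.toNat + 1)).reverse := by
    rw [List.take_reverse]
    have h2 : stalls.length - (stalls.length - 1 - j.toNat) = j.toNat + 1 := by omega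
    rw [h2]
  rw [htk]
  have : ((stalls.drop (j.toNat + 1)).reverse).foldl (fun a x => if x = 1 then 0 else a + 1) 0
      = pvCt (stalls.drop (j.toNat + 1)).reverse := rfl
  rw [this, pvCt_reverse]
  unfold right_distance
  have hjt : (j + 1).toNat = j.toNat + 1 := by omega
  rw [hjt, pvRdLoop_eq_pvClf]

theorem pvStep_eq (stalls : List Int) (j : Int) (h0 : 0 ≤ j) (h1 : j < (stalls.length : Int))
    (s : Int × Int × Int) :
    pvStepA stalls s j = pvStepB stalls (pvSweep 0 stalls) ((pvSweep 0 stalls.reverse).reverse) s j := by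
  obtain ⟨c, cm, idx⟩ := s
  simp only [pvStepA, pvStepB, pvLeftArr_getD stalls j h0 h1, pvRightArr_getD stalls j h0 h1]
  by_cases hocc : PySem.List.pyGetD stalls j 0 ≠ 1
  · simp only [if_pos hocc, gt_iff_lt]
    split_ifs <;> first | rfl | (dsimp only at *; first | rfl | (exfalso; omega))
  · simp only [if_neg hocc]

def pvInv (st : List Int × List Int × Int × Int) : Prop :=
  ∀ j ∈ st.2.1, 0 ≤ j ∧ j < (st.1.length : Int)

theorem pvIter_eq (st : List Int × List Int × Int × Int) (h : pvInv st) : pvIterA st = pvIterB st := by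
  simp only [pvIterA, pvIterB]
  rw [PySem.List.foldl_congr_mem st.2.1 (pvStepA st.1)
        (pvStepB st.1 (pvSweep 0 st.1) ((pvSweep 0 st.1.reverse).reverse)) _
        (fun acc x hx => pvStep_eq st.1 x (h x hx).1 (h x hx).2 acc)]

theorem pvInv_iter (st : List Int × List Int × Int × Int) (h : pvInv st) : pvInv (pvIterB st) := by
  intro j hj
  simp only [pvIterB, PySem.List.length_pySetD] at hj ⊢
  have hj' : j ∈ st.2.1 := by
    rcases hrem : PySem.List.remove? st.2.1
        (List.foldl (pvStepB st.1 (pvSweep 0 st.1) ((pvSweep 0 st.1.reverse).reverse))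
          (0, 0, (PySem.List.min? st.2.1 (fun x => x)).getD 0) st.2.1).2.2 with _ | l
    · rw [hrem] at hj
      exact hj
    · have hv : (List.foldl (pvStepB st.1 (pvSweep 0 st.1) ((pvSweep 0 st.1.reverse).reverse))
          (0, 0, (PySem.List.min? st.2.1 (fun x => x)).getD 0) st.2.1).2.2 ∈ st.2.1 := by
        by_contra hc
        rw [(PySem.List.remove?_eq_none_iff _ _).2 hc] at hrem
        simp at hrem
      have herase := PySem.List.remove?_eq_some_erase st.2.1 _ hv
      rw [hrem] at herase
      injection herase with hl
      rw [hrem] at hj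
      simp only [Option.getD_some] at hj
      rw [hl] at hj
      exact List.mem_of_mem_erase hj
  exact h j hj' 

theorem pvFold_eq (l : List Int) (st : List Int × List Int × Int × Int) (h : pvInv st) :
    l.foldl (fun s _ => pvIterA s) st = l.foldl (fun s _ => pvIterB s) st := by
  induction l generalizing st with
  | nil => rfl
  | cons x xs ih =>
    simp only [List.foldl_cons]
    rw [pvIter_eq st h]
    exact ih (pvIterB st) (pvInv_iter st h)

-- ===== VERDICT (by name: the statement is the Claim_ definition above) =====
theorem find_d_for_last_occupant_iterative_spec : Claim_equal_find_d_for_last_occupant_iterative := by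
  intro stalls num_occupants _hdom _hpre
  unfold Spec_find_d_for_last_occupant_iterative
  unfold find_d_for_last_occupant_iterative find_d_for_last_occupant_iterative_alt
  exact congrArg (fun r => [r.2.2.1, r.2.2.2])
    (pvFold_eq (PySem.List.pyRange 0 num_occupants 1)
      (stalls, PySem.List.pyRange 1 ((stalls.length : Int) - 1) 1, 0, PySem.Int.floordiv (stalls.length : Int) 2)
      (fun j hj => by
        rcases (PySem.List.mem_pyRange_one).1 hj with ⟨hl, hr⟩
        exact ⟨by omega, by simpa using by omega⟩))
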